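-- pv_equiv track=rewrite | github.com/rightthumb/rightthumb-widgets-v0 | widgets/python/_rightThumb/_hub/_string.py | totalStrip4
-- ===== SOURCE A (Python) =====
-- def totalStrip4(line):
-- 	PERMITTED_CHARS = "0123456789"
-- 	section = ''
-- 	for word in line.split(' '):
-- 		section += ''.join(c for c in word if c in PERMITTED_CHARS)
-- 		section += ' '
-- 	line = section + ']'
-- 	line = line.replace(' ]','')
-- 	line = line.replace(']','')
-- 	return line
-- ===== SOURCE B (Python) =====
-- def totalStrip4(line):
--     # One pass: keep digits and the (single-space) separators; words never
--     # contain spaces, so this equals per-word digit filtering joined by ' '.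
--     return ''.join(c for c in line if c in "0123456789 ")
-- ===== Notes on version B (the rewrite author's own statement) =====
-- stated objective: simpler
-- what changed: Replaces the split-by-space / per-word digit filter / trailing-marker replace dance with a single character-level filter over the whole line keeping digits and spaces.
import Mathlib
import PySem

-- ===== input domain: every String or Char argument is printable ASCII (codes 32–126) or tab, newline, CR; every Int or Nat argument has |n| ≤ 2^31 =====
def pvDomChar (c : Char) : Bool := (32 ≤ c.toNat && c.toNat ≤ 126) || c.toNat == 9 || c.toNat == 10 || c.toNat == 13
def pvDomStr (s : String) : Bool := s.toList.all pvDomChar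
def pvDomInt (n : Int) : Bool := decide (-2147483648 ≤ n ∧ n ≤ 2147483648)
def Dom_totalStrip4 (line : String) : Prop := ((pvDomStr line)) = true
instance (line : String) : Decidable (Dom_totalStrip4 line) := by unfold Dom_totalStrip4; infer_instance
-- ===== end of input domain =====

-- B replaces A's split / per-word filter / trailing-marker replace passes by one
-- character filter keeping digits and spaces (simpler; same return value).

-- ===== PORT A =====
-- A's PERMITTED_CHARS = "0123456789"
def pvPermittedA : List Char := ['0','1','2','3','4','5','6','7','8','9']

def totalStrip4 (line : String) : String :=
  -- section = ''; for word in line.split(' '): section += filter; section += ' '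
  let section_ : List Char :=
    (PySem.Chars.splitOn line.toList [' ']).foldl
      (fun sec word => (sec ++ word.filter (fun c => pvPermittedA.contains c)) ++ [' ']) []
  -- line = section + ']'
  let line1 : List Char := section_ ++ [']']
  -- line = line.replace(' ]','')
  let line2 : List Char := PySem.Chars.replace line1 [' ', ']'] []
  -- line = line.replace(']','')
  String.ofList (PySem.Chars.replace line2 [']'] [])

-- ===== PORT B =====
-- B's keep-set: "0123456789 " (digits plus the space character)
def pvPermittedB : List Char := ['0','1','2','3','4','5','6','7','8','9',' ']

def totalStrip4_alt (line : String) : String :=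
  String.ofList (line.toList.filter (fun c => pvPermittedB.contains c))

-- ===== PRECONDITION & SPEC =====
def Spec_totalStrip4 (line : String) (out : String) : Prop := out = totalStrip4_alt line
instance (line : String) (out : String) : Decidable (Spec_totalStrip4 line out) := by unfold Spec_totalStrip4; infer_instance

-- ===== CLAIM (what is proved, stated in full; the proofs are below) =====
def Claim_equal_totalStrip4 : Prop := ∀ (line : String), Dom_totalStrip4 line → Spec_totalStrip4 line (totalStrip4 line)

-- ===== LEMMAS AND PROOFS =====

-- test characters
def pvKeep (c : Char) : Bool := pvPermittedB.contains c
def pvDig (c : Char) : Bool := pvPermittedA.contains c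

theorem pvKeep_eq (c : Char) : pvKeep c = (pvDig c || decide (c = ' ')) := by
  simp [pvKeep, pvDig, pvPermittedA, pvPermittedB, Bool.or_assoc]

-- reference splitter: split on single spaces with a reversed-prefix accumulator
def pvSplit : List Char → List Char → List (List Char)
  | [], cur => [cur.reverse]
  | c :: t, cur => if c = ' ' then cur.reverse :: pvSplit t [] else pvSplit t (c :: cur)

theorem pvSplitOn_go_eq (l : List Char) : ∀ (fuel : Nat) (cur : List Char)
    (acc : List (List Char)), l.length ≤ fuel →
    PySem.Chars.splitOn.go [' '] fuel l cur acc = acc.reverse ++ pvSplit l cur := by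
  induction l with
  | nil =>
    intro fuel cur acc _
    cases fuel <;> simp [PySem.Chars.splitOn.go, pvSplit]
  | cons c t ih =>
    intro fuel cur acc hle
    cases fuel with
    | zero => simp at hle
    | succ f =>
      rw [PySem.Chars.splitOn.go]
      by_cases hc : c = ' '
      · subst hc
        have hpre : ([' '] : List Char).isPrefixOf (' ' :: t) = true := by
          simp [List.isPrefixOf]
        simp only [hpre, if_true, List.length_singleton, List.drop_succ_cons, List.drop_zero]
        rw [ih f [] (cur.reverse :: acc) (by simp at hle; omega)]
        simp [pvSplit]
      · have hpre : ([' '] : List Char).isPrefixOf (c :: t) = false := by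
          simp [List.isPrefixOf]
          exact fun h => (hc h.symm).elim
        simp only [hpre, Bool.false_eq_true, if_false]
        rw [ih f (c :: cur) acc (by simp at hle; omega)]
        simp [pvSplit, hc]

theorem pvSplitOn_eq (l : List Char) :
    PySem.Chars.splitOn l [' '] = pvSplit l [] := by
  rw [PySem.Chars.splitOn, pvSplitOn_go_eq l (l.length + 1) [] [] (by omega)]
  simp

theorem pvSplit_flatMap (l : List Char) : ∀ cur : List Char,
    (pvSplit l cur).flatMap (fun w => w.filter pvDig ++ [' ']) =
      cur.reverse.filter pvDig ++ l.filter pvKeep ++ [' '] := by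
  induction l with
  | nil => intro cur; simp [pvSplit]
  | cons c t ih =>
    intro cur
    by_cases hc : c = ' '
    · subst hc
      rw [show pvSplit (' ' :: t) cur = cur.reverse :: pvSplit t [] from by simp [pvSplit]]
      rw [List.flatMap_cons]
      have h0 := ih []
      simp only [List.reverse_nil, List.filter_nil, List.nil_append] at h0
      rw [h0]
      have hk : pvKeep ' ' = true := by decide
      simp [hk]
    · rw [show pvSplit (c :: t) cur = pvSplit t (c :: cur) from by simp [pvSplit, hc]]
      rw [ih (c :: cur)]
      have hk : pvKeep c = pvDig c := by
        rw [pvKeep_eq]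
        simp [hc]
      by_cases hd : pvDig c = true
      · simp [hk, hd]
      · simp only [Bool.not_eq_true] at hd
        simp [hk, hd]

theorem pvReplace_go_nil (old new acc : List Char) (f : Nat) :
    PySem.Chars.replace.go old new f [] acc = acc.reverse := by
  cases f <;> simp [PySem.Chars.replace.go]

theorem pvReplace1_go (F : List Char) : ∀ (acc : List Char) (fuel : Nat),
    ']' ∉ F → (F ++ [' ', ']']).length ≤ fuel →
    PySem.Chars.replace.go [' ', ']'] [] fuel (F ++ [' ', ']']) acc = acc.reverse ++ F := by
  induction F with
  | nil =>
    intro acc fuel _ hle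
    cases fuel with
    | zero => simp at hle
    | succ f =>
      rw [List.nil_append, PySem.Chars.replace.go]
      simp [pvReplace_go_nil]
  | cons c F' ih =>
    intro acc fuel hmem hle
    cases fuel with
    | zero => simp at hle
    | succ f =>
      rw [List.cons_append, PySem.Chars.replace.go]
      have hpre : ([' ', ']'] : List Char).isPrefixOf (c :: (F' ++ [' ', ']'])) = false := by
        cases F' with
        | nil => simp [List.isPrefixOf]
        | cons d t =>
          have hd : (']' == d) = false := by
            simp only [beq_eq_false_iff_ne, ne_eq]
            intro h; subst h; simp at hmem
          simp [List.isPrefixOf, hd]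
      simp only [hpre, Bool.false_eq_true, if_false]
      rw [ih (c :: acc) f (fun h => hmem (List.mem_cons_of_mem _ h)) (by simp at hle ⊢; omega)]
      simp

theorem pvReplace2_go (F : List Char) : ∀ (acc : List Char) (fuel : Nat),
    ']' ∉ F → F.length ≤ fuel →
    PySem.Chars.replace.go [']'] [] fuel F acc = acc.reverse ++ F := by
  induction F with
  | nil => intro acc fuel _ _; simp [pvReplace_go_nil]
  | cons c F' ih =>
    intro acc fuel hmem hle
    cases fuel with
    | zero => simp at hle
    | succ f =>
      rw [PySem.Chars.replace.go]
      have hpre : ([']'] : List Char).isPrefixOf (c :: F') = false := by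
        have hd : (']' == c) = false := by
          simp only [beq_eq_false_iff_ne, ne_eq]
          intro h; subst h; simp at hmem
        simp [List.isPrefixOf, hd]
      simp only [hpre, Bool.false_eq_true, if_false]
      rw [ih (c :: acc) f (fun h => hmem (List.mem_cons_of_mem _ h)) (by simp at hle; omega)]
      simp

theorem pvReplace1 (F : List Char) (h : ']' ∉ F) :
    PySem.Chars.replace (F ++ [' ', ']']) [' ', ']'] [] = F := by
  rw [PySem.Chars.replace]
  simp only [List.isEmpty_cons, Bool.false_eq_true, if_false]
  exact pvReplace1_go F [] (F ++ [' ', ']']).length h (le_refl _)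

theorem pvReplace2 (F : List Char) (h : ']' ∉ F) :
    PySem.Chars.replace F [']'] [] = F := by
  rw [PySem.Chars.replace]
  simp only [List.isEmpty_cons, Bool.false_eq_true, if_false]
  exact pvReplace2_go F [] F.length h (le_refl _)

theorem pvNoBracket (l : List Char) : ']' ∉ l.filter pvKeep := by
  intro h
  have := List.of_mem_filter h
  exact absurd this (by decide)

-- ===== VERDICT (by name: the statement is the Claim_ definition above) =====
theorem totalStrip4_spec : Claim_equal_totalStrip4 := by
  intro line _
  show totalStrip4 line = totalStrip4_alt line
  unfold totalStrip4 totalStrip4_alt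
  have hfun : (fun (sec word : List Char) =>
      (sec ++ word.filter (fun c => pvPermittedA.contains c)) ++ [' ']) =
      fun sec word => sec ++ (word.filter pvDig ++ [' ']) := by
    funext sec w; rw [List.append_assoc]; rfl
  rw [hfun, PySem.List.foldl_append_eq_flatMap, pvSplitOn_eq, pvSplit_flatMap]
  simp only [List.reverse_nil, List.filter_nil, List.nil_append]
  have hF : ']' ∉ line.toList.filter pvKeep := pvNoBracket _
  rw [show (List.filter pvKeep line.toList ++ [' ']) ++ [']'] =
      List.filter pvKeep line.toList ++ [' ', ']'] from by simp]
  rw [pvReplace1 _ hF, pvReplace2 _ hF]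
  rfl
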